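-- pv_equiv track=rewrite | github.com/Pusstes/FPOO195 | ListasYtuplas/EjercicioB.py | remplazar_repetidos_con_cero
-- ===== SOURCE A (Python) =====
-- def contar_repetidos(lista):
--     repetidos = {}
--     for num in lista:
--         if num in repetidos:
--             repetidos[num] += 1
--         else:
--             repetidos[num] = 1
--     return repetidos
--
-- def remplazar_repetidos_con_cero(lista):
--     repetidos = contar_repetidos(lista)
--     for num, cantidad in repetidos.items():
--         if cantidad > 1:
--             for i in range(cantidad - 1):
--                 index = lista.index(num)
--                 lista[index] = 0
--     return lista
-- ===== SOURCE B (Python) =====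
-- def remplazar_repetidos_con_cero(lista):
--     seen = set()
--     out = []
--     for x in reversed(lista):
--         out.append(0 if x in seen else x)
--         seen.add(x)
--     out.reverse()
--     lista[:] = out
--     return lista
-- ===== Notes on version B (the rewrite author's own statement) =====
-- stated objective: faster
-- what changed: Single right-to-left pass with a seen-set (zero every element that re-occurs later), instead of building a count dict and repeatedly rescanning the list with list.index for each repeated value.
import Mathlib
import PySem

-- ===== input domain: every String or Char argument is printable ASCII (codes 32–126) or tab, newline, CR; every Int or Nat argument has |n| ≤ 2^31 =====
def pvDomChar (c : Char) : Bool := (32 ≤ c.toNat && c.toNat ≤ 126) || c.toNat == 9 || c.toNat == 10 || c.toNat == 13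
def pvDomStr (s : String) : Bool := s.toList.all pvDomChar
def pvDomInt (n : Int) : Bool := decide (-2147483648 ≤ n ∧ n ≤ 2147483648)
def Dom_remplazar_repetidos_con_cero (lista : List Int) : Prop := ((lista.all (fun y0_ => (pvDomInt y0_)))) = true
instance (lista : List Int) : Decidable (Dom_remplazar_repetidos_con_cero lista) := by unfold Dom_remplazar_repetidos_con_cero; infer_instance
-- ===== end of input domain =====

-- B replaces A's count-dict + repeated list.index rescans by one right-to-left pass with a
-- seen-set; equal return value on every input (both Pythons also mutate `lista` in place the same way;
-- the theorem is about the return value).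

-- ===== PORT A =====
-- contar_repetidos: counting dict built by "if num in d: d[num] += 1 else: d[num] = 1"
def pvContar (lista : List Int) : PySem.Dict Int Int :=
  lista.foldl
    (fun repetidos num =>
      if (PySem.Dict.get? repetidos num).isSome then PySem.Dict.modify repetidos num 0 (· + 1)
      else PySem.Dict.insert repetidos num 1)
    PySem.Dict.empty

-- "for i in range(cantidad - 1): index = lista.index(num); lista[index] = 0"
-- (the none branch is where Python's list.index would raise ValueError; it is unreachable here,
--  since each iteration leaves at least one occurrence of num in the list)
def pvZeroLoop (num : Int) : Nat → List Int → List Int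
  | 0, l => l
  | n + 1, l =>
    match PySem.List.index? l num with
    | some i => pvZeroLoop num n (l.set i 0)
    | none => l

def remplazar_repetidos_con_cero (lista : List Int) : List Int :=
  (pvContar lista).items.foldl
    (fun l p => if 1 < p.2 then pvZeroLoop p.1 (p.2 - 1).toNat l else l) lista

-- ===== PORT B =====
-- one pass over reversed(lista), appending 0 for already-seen values, then out.reverse()
def remplazar_repetidos_con_cero_alt (lista : List Int) : List Int :=
  (lista.reverse.foldl
    (fun (p : PySem.Set Int × List Int) x =>
      (PySem.Set.add p.1 x, p.2 ++ [if PySem.Set.contains p.1 x then 0 else x]))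
    (PySem.Set.empty, [])).2.reverse

-- ===== PRECONDITION & SPEC =====
def Spec_remplazar_repetidos_con_cero (lista : List Int) (out : List Int) : Prop := out = remplazar_repetidos_con_cero_alt lista
instance (lista : List Int) (out : List Int) : Decidable (Spec_remplazar_repetidos_con_cero lista out) := by unfold Spec_remplazar_repetidos_con_cero; infer_instance

-- ===== CLAIM (what is proved, stated in full; the proofs are below) =====
def Claim_equal_remplazar_repetidos_con_cero : Prop := ∀ (lista : List Int), Dom_remplazar_repetidos_con_cero lista → Spec_remplazar_repetidos_con_cero lista (remplazar_repetidos_con_cero lista)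

-- ===== LEMMAS AND PROOFS =====

-- the common specification: zero every element with an equal element strictly later
def pvM : List Int → List Int
  | [] => []
  | x :: xs => (if x ∈ xs then 0 else x) :: pvM xs

theorem pvM_length (l : List Int) : (pvM l).length = l.length := by
  induction l with
  | nil => rfl
  | cons x xs ih => simp [pvM, ih]

theorem pvM_getElem (l : List Int) (i : Nat) (h : i < l.length) (h' : i < (pvM l).length) :
    (pvM l)[i] = if l[i] ∈ l.drop (i + 1) then 0 else l[i] := by
  induction l generalizing i with
  | nil => simp at h
  | cons x xs ih =>
    cases i with
    | zero => simp [pvM]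
    | succ i =>
      have hx : i < xs.length := by simpa using h
      simpa [pvM] using ih i hx (by simpa [pvM_length] using hx)

-- ---------- B = pvM ----------
def pvH : List Int → PySem.Set Int → List Int
  | [], _ => []
  | x :: r, s => (if PySem.Set.contains s x then 0 else x) :: pvH r (PySem.Set.add s x)

theorem pvFoldB (r : List Int) (s : PySem.Set Int) (acc : List Int) :
    (r.foldl
      (fun (p : PySem.Set Int × List Int) x =>
        (PySem.Set.add p.1 x, p.2 ++ [if PySem.Set.contains p.1 x then 0 else x]))
      (s, acc)).2 = acc ++ pvH r s := by
  induction r generalizing s acc with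
  | nil => simp [pvH]
  | cons x r ih =>
    simp only [List.foldl_cons]
    rw [ih]
    simp [pvH]

theorem pvH_append (a b : List Int) (s : PySem.Set Int) :
    pvH (a ++ b) s = pvH a s ++ pvH b (a.foldl PySem.Set.add s) := by
  induction a generalizing s with
  | nil => simp [pvH]
  | cons x a ih => simp [pvH, ih]

def pvMs : List Int → PySem.Set Int → List Int
  | [], _ => []
  | x :: xs, s => (if x ∈ xs ∨ x ∈ s then 0 else x) :: pvMs xs s

theorem pvH_rev_gen (l : List Int) (s : PySem.Set Int) :
    (pvH l.reverse s).reverse = pvMs l s := by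
  induction l generalizing s with
  | nil => simp [pvH, pvMs]
  | cons x xs ih =>
    have h1 : (x :: xs).reverse = xs.reverse ++ [x] := by simp
    rw [h1, pvH_append]
    have h2 : xs.reverse.foldl PySem.Set.add s = PySem.Set.update s xs.reverse := rfl
    simp [pvH, pvMs, ih, h2, PySem.Set.mem_update]
    by_cases hx : x ∈ xs <;> by_cases hs : x ∈ s <;> simp [hx, hs]

theorem pvH_reverse (l : List Int) :
    (pvH l.reverse PySem.Set.empty).reverse = pvM l := by
  rw [pvH_rev_gen]
  induction l with
  | nil => rfl
  | cons x xs ih =>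
    simp [pvMs, pvM, PySem.Set.empty]
    exact ih

theorem B_eq_pvM (l : List Int) : remplazar_repetidos_con_cero_alt l = pvM l := by
  unfold remplazar_repetidos_con_cero_alt
  rw [pvFoldB]
  simpa using pvH_reverse l

-- ---------- A = pvM ----------
theorem pvZeroLoop_length (v : Int) (n : Nat) (l : List Int) :
    (pvZeroLoop v n l).length = l.length := by
  induction n generalizing l with
  | zero => rfl
  | succ n ih =>
    unfold pvZeroLoop
    cases h : PySem.List.index? l v with
    | none => rfl
    | some i => simp [ih]

theorem pvZeroLoop_zero (n : Nat) (l : List Int) : pvZeroLoop 0 n l = l := by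
  induction n generalizing l with
  | zero => rfl
  | succ n ih =>
    unfold pvZeroLoop
    cases h : PySem.List.index? l 0 with
    | none => rfl
    | some i =>
      obtain ⟨hk, hv, -⟩ := PySem.List.getElem_of_index?_eq_some h
      show pvZeroLoop 0 n (l.set i 0) = l
      rw [show l.set i 0 = l from by rw [← hv]; exact List.set_getElem_self hk]
      exact ih l

theorem pvZeroLoop_getElem (v : Int) (n : Nat) (l : List Int) (i : Nat) (h : i < l.length)
    (h' : i < (pvZeroLoop v n l).length) :
    (pvZeroLoop v n l)[i] = if l[i] = v ∧ (l.take (i + 1)).count v ≤ n then 0 else l[i] := by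
  by_cases hv0 : v = 0
  · subst hv0
    have he : pvZeroLoop 0 n l = l := pvZeroLoop_zero n l
    rw [List.getElem_of_eq he]
    by_cases hl : l[i] = (0 : Int) <;> simp [hl]
  · induction n generalizing l with
    | zero =>
      have hcond : ¬(l[i] = v ∧ (l.take (i + 1)).count v ≤ 0) := by
        rintro ⟨he, hc⟩
        have hb : i < (l.take (i + 1)).length := by simp; omega
        have hmem : v ∈ l.take (i + 1) := by
          have : (l.take (i + 1))[i] = l[i] := List.getElem_take
          rw [← he, ← this]
          exact List.getElem_mem hb
        have := List.count_pos_iff.mpr hmem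
        omega
      simp only [pvZeroLoop]
      split_ifs with hc
      · exact absurd hc hcond
      · rfl
    | succ n ih =>
      cases hidx : PySem.List.index? l v with
      | none =>
        have hnm : v ∉ l := (PySem.List.index?_eq_none_iff l v).mp hidx
        have hne : l[i] ≠ v := fun he => hnm (he ▸ List.getElem_mem h)
        simp only [pvZeroLoop, hidx]
        simp [hne]
      | some j =>
        obtain ⟨pre, suf, hl, hjlen, hvpre⟩ := (PySem.List.index?_eq_some_iff l v j).mp hidx
        subst hl hjlen
        have hset : (pre ++ v :: suf).set pre.length 0 = pre ++ 0 :: suf := by simp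
        have hred : pvZeroLoop v (n + 1) (pre ++ v :: suf)
            = pvZeroLoop v n (pre ++ 0 :: suf) := by
          show (match PySem.List.index? (pre ++ v :: suf) v with
                | some i => pvZeroLoop v n ((pre ++ v :: suf).set i 0)
                | none => (pre ++ v :: suf)) = _
          rw [hidx]
          show pvZeroLoop v n ((pre ++ v :: suf).set pre.length 0) = _
          rw [hset]
        rw [List.getElem_of_eq hred]
        have hlen' : i < (pre ++ 0 :: suf).length := by simpa using h
        rw [ih (pre ++ 0 :: suf) hlen' (by rw [pvZeroLoop_length]; exact hlen')]
        rcases Nat.lt_trichotomy i pre.length with hlt | heq | hgt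
        · -- i < pre.length : element of pre, never equal to v
          have g1 : (pre ++ 0 :: suf)[i] = pre[i] := List.getElem_append_left hlt
          have g2 : (pre ++ v :: suf)[i] = pre[i] := List.getElem_append_left hlt
          have hne : pre[i] ≠ v := fun he => hvpre (he ▸ List.getElem_mem hlt)
          rw [g1, g2]
          simp [hne]
        · -- i = pre.length : the zeroed position
          subst heq
          have g1 : (pre ++ 0 :: suf)[pre.length] = (0 : Int) := by
            rw [List.getElem_append_right (by omega)]; simp
          have g2 : (pre ++ v :: suf)[pre.length] = v := by
            rw [List.getElem_append_right (by omega)]; simp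
          have ht : (pre ++ v :: suf).take (pre.length + 1) = pre ++ [v] := by
            rw [show pre.length + 1 = pre.length + (0 + 1) by ring, List.take_append]
            simp
          have hc : ((pre ++ v :: suf).take (pre.length + 1)).count v ≤ n + 1 := by
            rw [ht]
            simp [List.count_append, List.count_eq_zero_of_not_mem hvpre]
          rw [g1, g2]
          simp [Ne.symm hv0, hc]
        · -- pre.length < i : element of suf
          obtain ⟨k, hk⟩ : ∃ k, i = pre.length + 1 + k := ⟨i - pre.length - 1, by omega⟩
          subst hk
          have hks : k < suf.length := by
            have := h; simp at this; omega
          have g1 : (pre ++ 0 :: suf)[pre.length + 1 + k] = suf[k] := by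
            rw [List.getElem_append_right (by omega)]
            simp [show pre.length + 1 + k - pre.length = k + 1 by omega]
          have g2 : (pre ++ v :: suf)[pre.length + 1 + k] = suf[k] := by
            rw [List.getElem_append_right (by omega)]
            simp [show pre.length + 1 + k - pre.length = k + 1 by omega]
          have ht1 : (pre ++ v :: suf).take (pre.length + 1 + k + 1) = pre ++ v :: suf.take (k + 1) := by
            rw [show pre.length + 1 + k + 1 = pre.length + (k + 2) by ring, List.take_append]
            simp
          have ht2 : (pre ++ 0 :: suf).take (pre.length + 1 + k + 1) = pre ++ 0 :: suf.take (k + 1) := by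
            rw [show pre.length + 1 + k + 1 = pre.length + (k + 2) by ring, List.take_append]
            simp
          rw [g1, g2, ht1, ht2]
          have hc1 : (pre ++ v :: suf.take (k + 1)).count v
              = (suf.take (k + 1)).count v + 1 := by
            simp [List.count_append, List.count_eq_zero_of_not_mem hvpre]
          have hc2 : (pre ++ 0 :: suf.take (k + 1)).count v
              = (suf.take (k + 1)).count v := by
            simp [List.count_append, List.count_eq_zero_of_not_mem hvpre, Ne.symm hv0]
          rw [hc1, hc2]
          have hiff : (suf[k] = v ∧ (suf.take (k + 1)).count v ≤ n)
              ↔ (suf[k] = v ∧ (suf.take (k + 1)).count v + 1 ≤ n + 1) := by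
            constructor <;> rintro ⟨a, b⟩ <;> exact ⟨a, by omega⟩
          rw [if_congr hiff rfl rfl]

theorem pvContar_eq_counter (l : List Int) : pvContar l = PySem.Dict.counter l := by
  unfold pvContar
  rw [PySem.Dict.counter_eq_foldl]
  refine PySem.List.foldl_congr_mem _ _ _ _ (fun d x _ => ?_)
  by_cases h : (PySem.Dict.get? d x).isSome
  · simp [h, PySem.Dict.modify]
  · have hn : PySem.Dict.get? d x = none := by
      cases hg : PySem.Dict.get? d x
      · rfl
      · simp [hg] at h
    have hd : d.getD x 0 = 0 := PySem.Dict.getD_of_get?_eq_none (d := d) (k := x) (d0 := 0) hn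
    simp [h, PySem.Dict.modify, hd]

-- counts of v in equal-length lists that agree on "being v" positionwise agree on every prefix
theorem pvCountTake (orig cur : List Int) (v : Int) (hlen : cur.length = orig.length)
    (hpt : ∀ j (h : j < orig.length) (h2 : j < cur.length), (cur[j] = v ↔ orig[j] = v)) :
    ∀ k, (cur.take k).count v = (orig.take k).count v := by
  intro k
  induction k with
  | zero => simp
  | succ k ih =>
    rw [List.take_add_one, List.take_add_one, List.count_append, List.count_append, ih]
    by_cases hk : k < orig.length
    · have h2 : k < cur.length := by omega
      rw [List.getElem?_eq_getElem hk, List.getElem?_eq_getElem h2]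
      by_cases hv : orig[k] = v
      · simp [hv, (hpt k hk h2).mpr hv]
      · have : ¬ cur[k] = v := fun hc => hv ((hpt k hk h2).mp hc)
        simp [hv, this]
    · rw [List.getElem?_eq_none (by omega), List.getElem?_eq_none (by omega)]

theorem pvFoldA (orig : List Int) (vs : List Int) (S cur : List Int)
    (hnd : vs.Nodup) (hdisj : ∀ v ∈ vs, v ∉ S)
    (hlen : cur.length = orig.length)
    (hinv : ∀ i (h : i < orig.length) (h2 : i < cur.length),
      cur[i] = if orig[i] ∈ S ∧ orig[i] ∈ orig.drop (i + 1) then 0 else orig[i]) :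
    (vs.foldl (fun l v => if 1 < ((orig.count v : Int)) then
        pvZeroLoop v ((orig.count v : Int) - 1).toNat l else l) cur).length = orig.length ∧
    ∀ i (h : i < orig.length)
      (h2 : i < (vs.foldl (fun l v => if 1 < ((orig.count v : Int)) then
        pvZeroLoop v ((orig.count v : Int) - 1).toNat l else l) cur).length),
      (vs.foldl (fun l v => if 1 < ((orig.count v : Int)) then
        pvZeroLoop v ((orig.count v : Int) - 1).toNat l else l) cur)[i]
        = if (orig[i] ∈ S ∨ orig[i] ∈ vs) ∧ orig[i] ∈ orig.drop (i + 1) then 0 else orig[i] := by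
  induction vs generalizing S cur with
  | nil =>
    refine ⟨hlen, fun i h h2 => ?_⟩
    simpa using hinv i h h2
  | cons v vs ih =>
    simp only [List.foldl_cons]
    have hndt : vs.Nodup := hnd.of_cons
    have hvnotvs : v ∉ vs := (List.nodup_cons.mp hnd).1
    have hvS : v ∉ S := hdisj v (List.mem_cons_self)
    have hdisj' : ∀ w ∈ vs, w ∉ S ++ [v] := by
      intro w hw
      simp only [List.mem_append, List.mem_singleton]
      rintro (hws | rfl)
      · exact hdisj w (List.mem_cons_of_mem _ hw) hws
      · exact hvnotvs hw
    have hmemiff : ∀ (x : Int), ((x ∈ S ++ [v] ∨ x ∈ vs) ↔ (x ∈ S ∨ x ∈ v :: vs)) := by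
      intro x
      simp only [List.mem_append, List.mem_cons]
      tauto
    -- a helper: an element at i equal to v with a later occurrence forces count ≥ 2
    have hcount2 : ∀ i (h : i < orig.length), orig[i] = v → orig[i] ∈ orig.drop (i + 1) →
        2 ≤ orig.count v := by
      intro i h hov hlater
      have hsplit : (orig.take (i + 1)).count v + (orig.drop (i + 1)).count v = orig.count v := by
        rw [← List.count_append, List.take_append_drop]
      have hb : i < (orig.take (i + 1)).length := by simp; omega
      have htk : 0 < (orig.take (i + 1)).count v := by
        refine List.count_pos_iff.mpr ?_
        have hgt : (orig.take (i + 1))[i] = orig[i] := List.getElem_take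
        rw [← hov, ← hgt]
        exact List.getElem_mem hb
      have hdr : 0 < (orig.drop (i + 1)).count v := List.count_pos_iff.mpr (hov ▸ hlater)
      omega
    by_cases hgt : 1 < ((orig.count v : Int))
    · simp only [if_pos hgt]
      by_cases hv0 : v = 0
      · subst hv0
        simp only [pvZeroLoop_zero]
        have hinv' : ∀ i (h : i < orig.length) (h2 : i < cur.length),
            cur[i] = if orig[i] ∈ S ++ [(0 : Int)] ∧ orig[i] ∈ orig.drop (i + 1) then 0 else orig[i] := by
          intro i h h2
          rw [hinv i h h2]
          by_cases hS : orig[i] ∈ S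
          · simp [hS]
          · by_cases hlater : orig[i] ∈ orig.drop (i + 1)
            · by_cases hov : orig[i] = 0
              · simp [hov]
              · simp [hS, hlater, hov]
            · simp [hS, hlater]
        obtain ⟨hl, hres⟩ := ih (S ++ [0]) cur hndt hdisj' hlen hinv'
        exact ⟨hl, fun i h h2 => (hres i h h2).trans
          (if_congr (and_congr_left' (hmemiff _)) rfl rfl)⟩
      · have hlen1 : (pvZeroLoop v ((orig.count v : Int) - 1).toNat cur).length = orig.length := by
          rw [pvZeroLoop_length]; exact hlen
        have hpt : ∀ j (h : j < orig.length) (h2 : j < cur.length), (cur[j] = v ↔ orig[j] = v) := by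
          intro j h h2
          rw [hinv j h h2]
          split_ifs with hcnd
          · constructor
            · intro h0; exact absurd h0.symm hv0
            · intro hov; exact absurd (hov ▸ hcnd.1) hvS
          · exact Iff.rfl
        have hcnt := pvCountTake orig cur v hlen hpt
        have hN : ((orig.count v : Int) - 1).toNat = orig.count v - 1 := by omega
        have hinv' : ∀ i (h : i < orig.length)
            (h2 : i < (pvZeroLoop v ((orig.count v : Int) - 1).toNat cur).length),
            (pvZeroLoop v ((orig.count v : Int) - 1).toNat cur)[i]
              = if orig[i] ∈ S ++ [v] ∧ orig[i] ∈ orig.drop (i + 1) then 0 else orig[i] := by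
          intro i h h2
          have h2c : i < cur.length := by omega
          rw [pvZeroLoop_getElem v _ cur i h2c h2, hcnt (i + 1), hinv i h h2c, hN]
          by_cases hov : orig[i] = v
          · have hPf : ¬(orig[i] ∈ S ∧ orig[i] ∈ orig.drop (i + 1)) := by
              rintro ⟨hS, -⟩; exact hvS (hov ▸ hS)
            rw [if_neg hPf]
            have hmv : orig[i] ∈ S ++ [v] := by simp [hov]
            by_cases hlater : orig[i] ∈ orig.drop (i + 1)
            · have h2c' := hcount2 i h hov hlater
              have hsplit : (orig.take (i + 1)).count v + (orig.drop (i + 1)).count v = orig.count v := by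
                rw [← List.count_append, List.take_append_drop]
              have hdr : 0 < (orig.drop (i + 1)).count v := List.count_pos_iff.mpr (hov ▸ hlater)
              have hcle : (orig.take (i + 1)).count v ≤ orig.count v - 1 := by omega
              rw [if_pos ⟨hov, hcle⟩, if_pos ⟨hmv, hlater⟩]
            · -- no later occurrence: count in prefix is the whole count
              have hsplit : (orig.take (i + 1)).count v + (orig.drop (i + 1)).count v = orig.count v := by
                rw [← List.count_append, List.take_append_drop]
              have hdr : (orig.drop (i + 1)).count v = 0 := by
                by_contra hne
                exact hlater (by rw [hov]; exact List.count_pos_iff.mp (by omega))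
              have hc1 : 1 ≤ orig.count v := by omega
              have hcgt : ¬((orig.take (i + 1)).count v ≤ orig.count v - 1) := by omega
              rw [if_neg (fun hh => hcgt hh.2), if_neg (fun hh => hlater hh.2)]
          · have hne1 : ∀ (P : Prop) [Decidable P], ¬((if P then (0 : Int) else orig[i]) = v) := by
              intro P _
              split_ifs
              · exact fun h0 => hv0 h0.symm
              · exact hov
            rw [if_neg (by exact fun hh => hne1 _ hh.1)]
            have hmiff : orig[i] ∈ S ++ [v] ↔ orig[i] ∈ S := by
              simp only [List.mem_append, List.mem_singleton]
              constructor
              · rintro (hS | he)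
                · exact hS
                · exact absurd he hov
              · exact Or.inl
            exact if_congr (and_congr_left' hmiff.symm) rfl rfl
        obtain ⟨hl, hres⟩ := ih (S ++ [v]) _ hndt hdisj' hlen1 hinv'
        exact ⟨hl, fun i h h2 => (hres i h h2).trans
          (if_congr (and_congr_left' (hmemiff _)) rfl rfl)⟩
    · simp only [if_neg hgt]
      have hinv' : ∀ i (h : i < orig.length) (h2 : i < cur.length),
          cur[i] = if orig[i] ∈ S ++ [v] ∧ orig[i] ∈ orig.drop (i + 1) then 0 else orig[i] := by
        intro i h h2
        rw [hinv i h h2]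
        by_cases hS : orig[i] ∈ S
        · simp [hS]
        · by_cases hlater : orig[i] ∈ orig.drop (i + 1)
          · by_cases hov : orig[i] = v
            · exact absurd (hcount2 i h hov hlater) (by omega)
            · have : ¬ orig[i] ∈ S ++ [v] := by simp [hS, hov]
              simp [hS, this]
          · simp [hS, hlater]
      obtain ⟨hl, hres⟩ := ih (S ++ [v]) cur hndt hdisj' hlen hinv'
      exact ⟨hl, fun i h h2 => (hres i h h2).trans
        (if_congr (and_congr_left' (hmemiff _)) rfl rfl)⟩

theorem A_eq_pvM (l : List Int) : remplazar_repetidos_con_cero l = pvM l := by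
  unfold remplazar_repetidos_con_cero
  rw [pvContar_eq_counter, PySem.Dict.items_counter, List.foldl_map]
  obtain ⟨hl, hres⟩ := pvFoldA l (PySem.Set.ofList l) [] l (PySem.Set.nodup_ofList l)
      (by simp) rfl (by intro i h h2; simp)
  refine List.ext_getElem (by rw [hl, pvM_length]) (fun i h1 h2 => ?_)
  have hi : i < l.length := by rw [← hl]; exact h1
  rw [hres i hi h1, pvM_getElem l i hi h2]
  have hmem : l[i] ∈ PySem.Set.ofList l := (PySem.Set.mem_ofList l _).mpr (List.getElem_mem hi)
  simp [hmem]

-- ===== VERDICT (by name: the statement is the Claim_ definition above) =====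
theorem remplazar_repetidos_con_cero_spec : Claim_equal_remplazar_repetidos_con_cero := by
  intro lista _
  unfold Spec_remplazar_repetidos_con_cero
  rw [A_eq_pvM, B_eq_pvM]
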